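-- pv_equiv track=rewrite | github.com/jordannguyen321/hw4 | cacti.py | cacti_number
-- ===== SOURCE A (Python) =====
-- def cacti_number(arr):
--     def is_valid(x, y):
--         return 0 <= x < len(arr) and 0 <= y < len(arr[0])
--
--     def can_place_cactus(x, y):
--         return (
--             is_valid(x, y) and
--             arr[x][y] == 0 and
--             all(arr[i][j] != 1 for i in range(x - 1, x + 2) for j in range(y - 1, y + 2) if is_valid(i, j))
--         )
--     count = 0
--     for x in range(len(arr)):
--         for y in range(len(arr[0])):
--             if can_place_cactus(x, y):
--                 count += 1
--                 arr[x][y] = 1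
--     return count
-- ===== SOURCE B (Python) =====
-- def cacti_number(arr):
--     rows = len(arr)
--     cols = len(arr[0]) if arr else 0
--     blocked = set()
--
--     def block(x, y):
--         for i in range(max(x - 1, 0), min(x + 2, rows)):
--             for j in range(max(y - 1, 0), min(y + 2, cols)):
--                 blocked.add((i, j))
--
--     for x in range(rows):
--         for y in range(cols):
--             if arr[x][y] == 1:
--                 block(x, y)
--     count = 0
--     for x in range(rows):
--         for y in range(cols):
--             if arr[x][y] == 0 and (x, y) not in blocked:
--                 count += 1
--                 arr[x][y] = 1
--                 block(x, y)
--     return count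
-- ===== Notes on version B (the rewrite author's own statement) =====
-- stated objective: alternative
-- what changed: Instead of rescanning the 3x3 neighborhood of every cell against the mutated grid, B precomputes a blocked set of all cells within the 3x3 neighborhood of an initial 1 and, on each placement, propagates the placed cactus's neighborhood outward into that set, so placement decisions are a set lookup plus an original-value check.
import Mathlib
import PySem

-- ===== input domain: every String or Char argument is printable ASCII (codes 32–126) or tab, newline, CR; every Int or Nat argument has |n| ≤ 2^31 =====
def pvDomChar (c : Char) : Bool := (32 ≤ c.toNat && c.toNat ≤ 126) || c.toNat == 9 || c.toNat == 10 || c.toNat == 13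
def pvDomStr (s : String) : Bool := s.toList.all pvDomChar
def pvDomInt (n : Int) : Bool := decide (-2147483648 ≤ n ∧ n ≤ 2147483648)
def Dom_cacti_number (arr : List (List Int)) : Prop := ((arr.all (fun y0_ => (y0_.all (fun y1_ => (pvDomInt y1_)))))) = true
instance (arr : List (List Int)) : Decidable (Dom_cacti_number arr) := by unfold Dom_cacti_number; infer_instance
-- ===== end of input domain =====

-- B replaces A's inward 9-cell rescan of the mutated grid at every cell by a precomputed
-- `blocked` set that is propagated outward at each placement; both mutate arr identically
-- in Python, and the equivalence proved here is about the RETURN value.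

-- ===== PORT A =====
-- arr[x][y]: read only under is_valid guards (0 ≤ x, 0 ≤ y, in bounds), where getD is exact
def pvCell (g : List (List Int)) (x y : Int) : Int := (g.getD x.toNat []).getD y.toNat 0

-- is_valid(x, y): lengths read from the mutated grid (element mutation keeps all lengths)
def pvIsValid (g : List (List Int)) (x y : Int) : Bool :=
  decide (0 ≤ x ∧ x < (g.length : Int) ∧ 0 ≤ y ∧ y < ((g.getD 0 []).length : Int))

-- can_place_cactus(x, y)
def pvCanPlace (g : List (List Int)) (x y : Int) : Bool :=
  pvIsValid g x y && (pvCell g x y == 0) &&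
  ((PySem.List.pyRange (x - 1) (x + 2) 1).all fun i =>
    (PySem.List.pyRange (y - 1) (y + 2) 1).all fun j =>
      !(pvIsValid g i j) || !(pvCell g i j == 1))

-- arr[x][y] = 1 (executed only at valid nonnegative coordinates)
def pvSet1 (g : List (List Int)) (x y : Int) : List (List Int) :=
  g.set x.toNat ((g.getD x.toNat []).set y.toNat 1)

-- loop body of A: if can_place_cactus(x, y): count += 1; arr[x][y] = 1
def pvStepA (st : List (List Int) × Int) (p : Int × Int) : List (List Int) × Int :=
  if pvCanPlace st.1 p.1 p.2 then (pvSet1 st.1 p.1 p.2, st.2 + 1) else st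

-- range(len(arr[0])) is re-read each outer iteration in Python; lengths are unchanged by
-- element assignment, so the original arr gives the same range.
def cacti_number (arr : List (List Int)) : Int :=
  ((PySem.List.pyRange 0 arr.length 1).foldl
    (fun st x =>
      (PySem.List.pyRange 0 ((arr.getD 0 []).length : Int) 1).foldl
        (fun st y => pvStepA st (x, y)) st)
    (arr, 0)).2

-- ===== PORT B =====
-- the clipped 3x3 neighborhood cells of (x, y)
def pvNbhd (rows cols x y : Int) : List (Int × Int) :=
  (PySem.List.pyRange (max (x - 1) 0) (min (x + 2) rows) 1).flatMap fun i =>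
    (PySem.List.pyRange (max (y - 1) 0) (min (y + 2) cols) 1).map fun j => (i, j)

-- block(x, y): add every clipped neighborhood cell to the set
def pvBlock (rows cols : Int) (b : PySem.Set (Int × Int)) (x y : Int) : PySem.Set (Int × Int) :=
  (pvNbhd rows cols x y).foldl PySem.Set.add b

-- first-pass body: if arr[x][y] == 1: block(x, y)
def pvMark (arr : List (List Int)) (rows cols : Int) (b : PySem.Set (Int × Int))
    (p : Int × Int) : PySem.Set (Int × Int) :=
  if pvCell arr p.1 p.2 == 1 then pvBlock rows cols b p.1 p.2 else b

-- second-pass body: if arr[x][y] == 0 and (x,y) not in blocked: count += 1; arr[x][y] = 1; block(x, y)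
def pvStepB (rows cols : Int) (st : List (List Int) × PySem.Set (Int × Int) × Int)
    (p : Int × Int) : List (List Int) × PySem.Set (Int × Int) × Int :=
  if pvCell st.1 p.1 p.2 == 0 && !(PySem.Set.contains st.2.1 (p.1, p.2))
  then (pvSet1 st.1 p.1 p.2, pvBlock rows cols st.2.1 p.1 p.2, st.2.2 + 1) else st

def cacti_number_alt (arr : List (List Int)) : Int :=
  let rows : Int := arr.length
  let cols : Int := ((arr.getD 0 []).length : Int)   -- len(arr[0]) if arr else 0
  let blk := (PySem.List.pyRange 0 rows 1).foldl
    (fun b x => (PySem.List.pyRange 0 cols 1).foldl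
      (fun b y => pvMark arr rows cols b (x, y)) b)
    PySem.Set.empty
  ((PySem.List.pyRange 0 rows 1).foldl
    (fun st x => (PySem.List.pyRange 0 cols 1).foldl
      (fun st y => pvStepB rows cols st (x, y)) st)
    (arr, blk, 0)).2.2

-- ===== PRECONDITION & SPEC =====
-- Pre_ excludes exactly the ragged grids on which A raises IndexError: some row shorter
-- than the first row (every cell (x, y) with y < len(arr[0]) is read by A).
def Pre_cacti_number (arr : List (List Int)) : Prop :=
  ∀ row ∈ arr, (arr.getD 0 []).length ≤ row.length
instance (arr : List (List Int)) : Decidable (Pre_cacti_number arr) := by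
  unfold Pre_cacti_number; infer_instance

def pvWitness_cacti_number : List (List Int) := [[0, 0, 1], [0, 0, 0]]

def Spec_cacti_number (arr : List (List Int)) (out : Int) : Prop := out = cacti_number_alt arr
instance (arr : List (List Int)) (out : Int) : Decidable (Spec_cacti_number arr out) := by
  unfold Spec_cacti_number; infer_instance

-- ===== CLAIM (what is proved, stated in full; the proofs are below) =====
def Claim_equal_cacti_number : Prop :=
  ∀ (arr : List (List Int)), Dom_cacti_number arr → Pre_cacti_number arr →
    Spec_cacti_number arr (cacti_number arr)

-- ===== LEMMAS AND PROOFS =====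

-- row-major list of all valid cells
def pvCells (rows cols : Int) : List (Int × Int) :=
  (PySem.List.pyRange 0 rows 1).flatMap fun x =>
    (PySem.List.pyRange 0 cols 1).map fun y => (x, y)

def pvValid (rows cols : Int) (p : Int × Int) : Prop :=
  0 ≤ p.1 ∧ p.1 < rows ∧ 0 ≤ p.2 ∧ p.2 < cols

def ShapeInv (arr g : List (List Int)) : Prop :=
  g.length = arr.length ∧ ∀ i : Nat, (g.getD i []).length = (arr.getD i []).length

-- blocked = the valid cells having a 3x3 neighbor (incl. itself) equal to 1 in the grid
def BlkInv (rows cols : Int) (g : List (List Int)) (blk : PySem.Set (Int × Int)) : Prop :=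
  ∀ u v : Int, pvValid rows cols (u, v) →
    ((u, v) ∈ blk ↔ ∃ i j : Int, pvValid rows cols (i, j) ∧
      i ≤ u + 1 ∧ u ≤ i + 1 ∧ j ≤ v + 1 ∧ v ≤ j + 1 ∧ pvCell g i j = 1)

lemma pv_foldl_nested {σ : Type} (f : σ → Int × Int → σ) (xs ys : List Int) (init : σ) :
    xs.foldl (fun s x => ys.foldl (fun s y => f s (x, y)) s) init
      = (xs.flatMap fun x => ys.map fun y => (x, y)).foldl f init := by
  induction xs generalizing init with
  | nil => rfl
  | cons x xs ih => simp [List.foldl_append, List.foldl_map, ih]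

lemma pv_mem_cells (rows cols : Int) (p : Int × Int) :
    p ∈ pvCells rows cols ↔ pvValid rows cols p := by
  obtain ⟨x, y⟩ := p
  simp [pvCells, pvValid, List.mem_flatMap, PySem.List.mem_pyRange_one]
  tauto

lemma pv_mem_nbhd (rows cols x y u v : Int) :
    (u, v) ∈ pvNbhd rows cols x y ↔
      max (x - 1) 0 ≤ u ∧ u < min (x + 2) rows ∧ max (y - 1) 0 ≤ v ∧ v < min (y + 2) cols := by
  simp [pvNbhd, List.mem_flatMap, PySem.List.mem_pyRange_one]
  tauto

lemma pv_mem_block (rows cols x y : Int) (b : PySem.Set (Int × Int)) (q : Int × Int) :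
    q ∈ pvBlock rows cols b x y ↔ q ∈ b ∨ q ∈ pvNbhd rows cols x y := by
  have := PySem.Set.mem_foldl_add (l := pvNbhd rows cols x y) (f := fun p => p) (s := b) (y := q)
  simpa [pvBlock, eq_comm] using this

lemma pv_shape_set1 (arr g : List (List Int)) (x y : Int)
    (h : ShapeInv arr g) : ShapeInv arr (pvSet1 g x y) := by
  obtain ⟨h1, h2⟩ := h
  refine ⟨by simpa [pvSet1] using h1, fun i => ?_⟩
  simp only [pvSet1, List.getD_eq_getElem?_getD, List.getElem?_set]
  by_cases hix : x.toNat = i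
  · subst hix
    by_cases hlt : x.toNat < g.length
    · have := h2 x.toNat
      simp only [List.getD_eq_getElem?_getD] at this
      simpa [hlt, List.getElem?_eq_getElem hlt] using this
    · have hg : g[x.toNat]? = none := by
        rw [List.getElem?_eq_none_iff]; omega
      have := h2 x.toNat
      simp only [List.getD_eq_getElem?_getD] at this
      simpa [hlt, hg] using this
  · have := h2 i
    simp only [List.getD_eq_getElem?_getD] at this
    simpa [hix] using this

lemma pv_cell_set1 (g : List (List Int)) (x y u v : Int)
    (hx : 0 ≤ x) (hy : 0 ≤ y) (hu : 0 ≤ u) (hv : 0 ≤ v)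
    (hxr : x.toNat < g.length) (hyc : y.toNat < (g.getD x.toNat []).length) :
    pvCell (pvSet1 g x y) u v = if u = x ∧ v = y then 1 else pvCell g u v := by
  by_cases hux : u = x
  · subst hux
    by_cases hvy : v = y
    · subst hvy
      simp only [pvCell, pvSet1, List.getD_eq_getElem?_getD, and_self, ite_true]
      rw [List.getElem?_set_self hxr, Option.getD_some,
        List.getElem?_set_self (by simpa [List.getD_eq_getElem?_getD] using hyc),
        Option.getD_some]
    · simp only [pvCell, pvSet1, List.getD_eq_getElem?_getD]
      rw [if_neg (by tauto), List.getElem?_set_self hxr, Option.getD_some,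
        List.getElem?_set_ne (by omega)]
  · simp only [pvCell, pvSet1, List.getD_eq_getElem?_getD]
    rw [if_neg (by tauto), List.getElem?_set_ne (by omega)]

-- membership through B's first pass
lemma pv_blk0_mem (arr : List (List Int)) (rows cols : Int) :
    ∀ (cs : List (Int × Int)) (b : PySem.Set (Int × Int)) (q : Int × Int),
      q ∈ cs.foldl (pvMark arr rows cols) b ↔
        q ∈ b ∨ ∃ p ∈ cs, pvCell arr p.1 p.2 = 1 ∧ q ∈ pvNbhd rows cols p.1 p.2 := by
  intro cs
  induction cs with
  | nil => simp
  | cons p cs ih =>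
    intro b q
    simp only [List.foldl_cons, pvMark]
    by_cases h1 : pvCell arr p.1 p.2 = 1
    · rw [if_pos (by simpa using h1)]
      rw [ih]
      simp [pv_mem_block, h1]
      tauto
    · rw [if_neg (by simpa using h1)]
      rw [ih]
      simp [h1]

-- the two loop bodies take the same branch and preserve the invariants
lemma pv_main (arr : List (List Int)) (rows cols : Int)
    (hr : rows = (arr.length : Int)) (hc : cols = ((arr.getD 0 []).length : Int))
    (hpre : Pre_cacti_number arr) :
    ∀ (cs : List (Int × Int)) (g : List (List Int)) (blk : PySem.Set (Int × Int)) (c : Int),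
      (∀ p ∈ cs, pvValid rows cols p) → ShapeInv arr g → BlkInv rows cols g blk →
      (cs.foldl pvStepA (g, c)).2 = (cs.foldl (pvStepB rows cols) (g, blk, c)).2.2 := by
  intro cs
  induction cs with
  | nil => intro g blk c _ _ _; rfl
  | cons p cs ih =>
    rintro g blk c hval hsh hblk
    obtain ⟨x, y⟩ := p
    have hv : pvValid rows cols (x, y) := hval _ (by simp)
    obtain ⟨hx0, hxr', hy0, hyc'⟩ := hv
    simp only at hx0 hxr' hy0 hyc'
    have hxr : x.toNat < g.length := by rw [hsh.1]; omega
    have hrowmem : arr.getD x.toNat [] ∈ arr := by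
      have hxa : x.toNat < arr.length := by omega
      rw [List.getD_eq_getElem?_getD, List.getElem?_eq_getElem hxa]
      exact List.getElem_mem hxa
    have hyc : y.toNat < (g.getD x.toNat []).length := by
      have := hpre _ hrowmem
      have := hsh.2 x.toNat
      omega
    -- the neighbourhood-free property both conditions are equivalent to
    set P : Prop := pvCell g x y = 0 ∧ ∀ i j : Int, pvValid rows cols (i, j) →
        i ≤ x + 1 → x ≤ i + 1 → j ≤ y + 1 → y ≤ j + 1 → pvCell g i j ≠ 1 with hP
    have hvalid_iff : ∀ i j : Int, pvIsValid g i j = true ↔ pvValid rows cols (i, j) := by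
      intro i j
      have h0 : (g.getD 0 []).length = (arr.getD 0 []).length := hsh.2 0
      simp only [pvIsValid, decide_eq_true_eq, pvValid, hr, hc, hsh.1, h0]
    have hA : pvCanPlace g x y = true ↔ P := by
      simp only [pvCanPlace, Bool.and_eq_true, List.all_eq_true, PySem.List.mem_pyRange_one,
        Bool.or_eq_true, Bool.not_eq_true', beq_iff_eq]
      constructor
      · rintro ⟨⟨-, hcell⟩, hall⟩
        refine ⟨by simpa using hcell, fun i j hij b1 b2 b3 b4 => ?_⟩
        have := hall i ⟨by omega, by omega⟩ j ⟨by omega, by omega⟩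
        rcases this with h | h
        · rw [← hvalid_iff i j] at hij; simp [hij] at h
        · simpa using h
      · rintro ⟨hcell, hall⟩
        refine ⟨⟨(hvalid_iff x y).mpr ⟨hx0, hxr', hy0, hyc'⟩, by simpa using hcell⟩,
          fun i hi j hj => ?_⟩
        by_cases hij : pvValid rows cols (i, j)
        · right
          simpa using hall i j hij (by omega) (by omega) (by omega) (by omega)
        · left
          rw [← hvalid_iff i j] at hij
          simpa using hij
    have hB : (pvCell g x y == 0 && !(PySem.Set.contains blk (x, y))) = true ↔ P := by
      simp only [Bool.and_eq_true, beq_iff_eq, Bool.not_eq_true',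
        PySem.Set.contains_eq_listContains, ← Bool.not_eq_true, List.contains_iff_mem]
      rw [hblk x y ⟨hx0, hxr', hy0, hyc'⟩]
      constructor
      · rintro ⟨hcell, hnb⟩
        refine ⟨hcell, fun i j hij b1 b2 b3 b4 hone => hnb ⟨i, j, hij, b1, b2, b3, b4, hone⟩⟩
      · rintro ⟨hcell, hall⟩
        exact ⟨hcell, fun ⟨i, j, hij, b1, b2, b3, b4, hone⟩ => hall i j hij b1 b2 b3 b4 hone⟩
    simp only [List.foldl_cons]
    by_cases hp : P
    · have ha' : pvCanPlace g x y = true := hA.mpr hp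
      have hb' : (pvCell g x y == 0 && !(PySem.Set.contains blk (x, y))) = true := hB.mpr hp
      simp only [pvStepA, pvStepB, ha', hb', if_true]
      refine ih _ _ _ (fun q hq => hval q (by simp [hq])) (pv_shape_set1 arr g x y hsh) ?_
      -- BlkInv is preserved by a placement
      intro u v huv
      rw [pv_mem_block, pv_mem_nbhd, hblk u v huv]
      obtain ⟨hu0, hur, hv0, hvc⟩ := huv
      simp only at hu0 hur hv0 hvc
      constructor
      · rintro (⟨i, j, hij, b1, b2, b3, b4, hone⟩ | hn)
        · refine ⟨i, j, hij, b1, b2, b3, b4, ?_⟩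
          rw [pv_cell_set1 g x y i j hx0 hy0 hij.1 hij.2.2.1 hxr hyc]
          split_ifs with h
          · rfl
          · exact hone
        · refine ⟨x, y, ⟨hx0, hxr', hy0, hyc'⟩, by omega, by omega, by omega, by omega, ?_⟩
          rw [pv_cell_set1 g x y x y hx0 hy0 hx0 hy0 hxr hyc]
          simp
      · rintro ⟨i, j, hij, b1, b2, b3, b4, hone⟩
        rw [pv_cell_set1 g x y i j hx0 hy0 hij.1 hij.2.2.1 hxr hyc] at hone
        by_cases hixy : i = x ∧ j = y
        · right
          obtain ⟨rfl, rfl⟩ := hixy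
          omega
        · left
          exact ⟨i, j, hij, b1, b2, b3, b4, by rwa [if_neg hixy] at hone⟩
    · have ha' : pvCanPlace g x y = false := by
        rw [← Bool.not_eq_true]; exact fun h => hp (hA.mp h)
      have hb' : (pvCell g x y == 0 && !(PySem.Set.contains blk (x, y))) = false := by
        rw [← Bool.not_eq_true]; exact fun h => hp (hB.mp h)
      simp only [pvStepA, pvStepB, ha', hb', if_false, Bool.false_eq_true]
      exact ih _ _ _ (fun q hq => hval q (by simp [hq])) hsh hblk

-- ===== VERDICT (by name: the statement is the Claim_ definition above) =====
theorem cacti_number_spec : Claim_equal_cacti_number := by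
  intro arr _ hpre
  unfold Spec_cacti_number
  simp only [cacti_number, cacti_number_alt]
  rw [pv_foldl_nested pvStepA, pv_foldl_nested (pvStepB (arr.length : Int) ((arr.getD 0 []).length : Int)),
      pv_foldl_nested (pvMark arr (arr.length : Int) ((arr.getD 0 []).length : Int))]
  exact pv_main arr _ _ rfl rfl hpre _ arr _ 0
    (fun p hp => (pv_mem_cells _ _ p).mp hp)
    ⟨rfl, fun _ => rfl⟩
    (by
      intro u v huv
      rw [pv_blk0_mem]
      simp only [PySem.Set.empty, List.not_mem_nil, false_or]
      constructor
      · rintro ⟨p, hpmem, hone, hn⟩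
        obtain ⟨x, y⟩ := p
        have hvp := (pv_mem_cells _ _ _).mp hpmem
        obtain ⟨hx0, hxr, hy0, hyc⟩ := hvp
        rw [pv_mem_nbhd] at hn
        exact ⟨x, y, ⟨hx0, hxr, hy0, hyc⟩, by omega, by omega, by omega, by omega, hone⟩
      · rintro ⟨i, j, hij, b1, b2, b3, b4, hone⟩
        obtain ⟨hu0, hur, hv0, hvc⟩ := huv
        refine ⟨(i, j), (pv_mem_cells _ _ _).mpr hij, hone, ?_⟩
        rw [pv_mem_nbhd]
        obtain ⟨hi0, hir, hj0, hjc⟩ := hij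
        simp only at *
        omega)
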